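-- pv_equiv track=rewrite | github.com/jk-jung/problem-solving | codewars/6kyu/6_Base Reduction.py | basereduct
-- ===== SOURCE A (Python) =====
-- def basereduct(x):
--     if x > 1e20:return -1
--     if x < 10: return x
--     t = int(max(str(x))) + 1
--     if t == 10: t = 11
--     r = 0
--     for x in str(x):
--         r = r * t + int(x)
--     return basereduct(r)
-- ===== SOURCE B (Python) =====
-- def basereduct(x):
--     # iterative loop + arithmetic digit extraction (divmod) instead of
--     # recursion + string conversion
--     while 10 <= x <= 10**20:
--         n, digs = x, []
--         while n:
--             n, d = divmod(n, 10)
--             digs.append(d)          # least-significant first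
--         m = 0
--         for d in digs:
--             if d > m:
--                 m = d
--         t = m + 1 if m < 9 else 11
--         x = 0
--         for d in reversed(digs):
--             x = x * t + d
--     return x if x <= 10**20 else -1
-- ===== Notes on version B (the rewrite author's own statement) =====
-- stated objective: alternative
-- what changed: Replaces the tail recursion and the per-step str(x)/max(str)/int(c) string machinery by an explicit while loop that extracts digits arithmetically with divmod and tracks the maximum digit during a plain scan.
import Mathlib
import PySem

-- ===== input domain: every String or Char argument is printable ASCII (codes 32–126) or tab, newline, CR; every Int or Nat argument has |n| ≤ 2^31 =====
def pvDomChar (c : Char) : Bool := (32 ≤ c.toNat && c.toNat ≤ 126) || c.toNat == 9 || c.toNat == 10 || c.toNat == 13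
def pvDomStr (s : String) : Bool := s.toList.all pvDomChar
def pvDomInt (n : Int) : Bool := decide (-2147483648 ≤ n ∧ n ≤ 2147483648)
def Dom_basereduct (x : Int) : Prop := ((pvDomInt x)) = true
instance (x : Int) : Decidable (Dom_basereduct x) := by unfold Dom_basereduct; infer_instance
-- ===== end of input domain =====

-- B replaces A's recursion + string digit machinery by an explicit while loop with
-- arithmetic (divmod) digit extraction; equivalence of return values is proved on Dom.

-- ===== PORT A =====
-- Literal port of A's recursion. The fuel argument only makes the same computation
-- total (guard allowed by the task rules); it is never exhausted on Dom inputs.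
-- Python's 1e20 equals 10^20 exactly. int(c) for a decimal-digit char c is its
-- code minus 48, and max over the digit characters of str(x) (x ≥ 10, so nonempty,
-- all values ≥ 0) is ported as a fold of max over the digit values starting at 0
-- (char order on digits equals numeric order) — exact on those strings.
def basereductGo : Nat → Int → Int
  | 0, _ => -2  -- fuel exhausted: unreachable on Dom
  | fuel + 1, x =>
    if x > 10 ^ 20 then -1
    else if x < 10 then x
    else
      let s := PySem.Int.toChars x                                  -- str(x)
      let m := (s.map (fun c => (c.toNat : Int) - 48)).foldl max 0  -- int(max(str(x)))
      let t := if m + 1 = 10 then 11 else m + 1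
      let r := s.foldl (fun r c => r * t + ((c.toNat : Int) - 48)) 0
      basereductGo fuel r

def basereduct (x : Int) : Int := basereductGo 1000000 x

-- ===== PORT B =====
-- Inner `while n:` digit-extraction loop of B, least-significant digit first.
-- The fuel (64 at each call) only makes the loop total; 10^20-capped inputs have
-- at most 21 digits.
def bDigitsRev : Nat → Int → List Int
  | 0, _ => []
  | fuel + 1, n =>
    if n = 0 then []
    else PySem.Int.mod n 10 :: bDigitsRev fuel (PySem.Int.floordiv n 10)

def basereductAltGo : Nat → Int → Int
  | 0, _ => -2  -- fuel exhausted: unreachable on Dom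
  | fuel + 1, x =>
    if 10 ≤ x ∧ x ≤ 10 ^ 20 then
      let digs := bDigitsRev 64 x
      let m := digs.foldl (fun m d => if d > m then d else m) 0
      let t := if m < 9 then m + 1 else 11
      let x' := digs.reverse.foldl (fun a d => a * t + d) 0
      basereductAltGo fuel x'
    else if x ≤ 10 ^ 20 then x else -1

def basereduct_alt (x : Int) : Int := basereductAltGo 1000000 x

-- ===== PRECONDITION & SPEC =====
def Spec_basereduct (x : Int) (out : Int) : Prop := out = basereduct_alt x
instance (x : Int) (out : Int) : Decidable (Spec_basereduct x out) := by unfold Spec_basereduct; infer_instance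

-- ===== CLAIM (what is proved, stated in full; the proofs are below) =====
def Claim_equal_basereduct : Prop := ∀ (x : Int), Dom_basereduct x → Spec_basereduct x (basereduct x)

-- ===== LEMMAS AND PROOFS =====

-- reference digit extraction on Nat, least-significant first
def divRev (n : Nat) : List Nat :=
  if h : n = 0 then [] else n % 10 :: divRev (n / 10)
decreasing_by exact Nat.div_lt_self (Nat.pos_of_ne_zero h) (by norm_num)

lemma divRev_lt (n : Nat) : ∀ d ∈ divRev n, d < 10 := by
  induction n using Nat.strong_induction_on with
  | _ n ih =>
    rw [divRev]
    split
    · simp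
    · rename_i h
      intro d hd
      rcases List.mem_cons.mp hd with rfl | hd
      · exact Nat.mod_lt _ (by norm_num)
      · exact ih (n / 10) (Nat.div_lt_self (Nat.pos_of_ne_zero h) (by norm_num)) d hd

lemma bDigitsRev_eq (fuel : Nat) (n : Int) (h0 : 0 ≤ n) (hf : n < 10 ^ fuel) :
    bDigitsRev fuel n = (divRev n.toNat).map (fun d : Nat => (d : Int)) := by
  induction fuel generalizing n with
  | zero =>
    have : n = 0 := by omega
    subst this
    simp [bDigitsRev, divRev]
  | succ f ih =>
    rw [bDigitsRev]
    by_cases hz : n = 0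
    · subst hz; simp [divRev]
    · rw [if_neg hz]
      have hpos : 0 < n := lt_of_le_of_ne h0 (Ne.symm hz)
      rw [PySem.Int.mod_eq_emod_of_pos (b := 10) (by norm_num),
          PySem.Int.floordiv_eq_ediv_of_pos (b := 10) (by norm_num)]
      have hdiv : n / 10 < 10 ^ f := by
        have h10 : n < 10 ^ f * 10 := by
          calc n < 10 ^ (f + 1) := hf
          _ = 10 ^ f * 10 := by ring
        exact Int.ediv_lt_of_lt_mul (by norm_num) h10
      rw [ih (n / 10) (by positivity) hdiv]
      conv_rhs => rw [divRev]
      rw [dif_neg (by omega)]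
      simp only [List.map_cons]
      congr 1
      · omega
      · have hna : (n / 10).toNat = n.toNat / 10 := by omega
        rw [hna]

lemma toDigitsCore_eq (fuel : Nat) : ∀ (n : Nat) (ds : List Char), 0 < n → n < 10 ^ fuel →
    Nat.toDigitsCore 10 fuel n ds = ((divRev n).map Nat.digitChar).reverse ++ ds := by
  induction fuel with
  | zero => intro n ds h1 h2; omega
  | succ f ih =>
    intro n ds h1 h2
    rw [Nat.toDigitsCore]
    by_cases hz : n / 10 = 0
    · rw [if_pos hz]
      rw [divRev, dif_neg (by omega)]
      rw [divRev, dif_pos hz]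
      simp
    · rw [if_neg hz]
      have hdiv : n / 10 < 10 ^ f := by
        have : n < 10 ^ f * 10 := by
          have : (10:Nat) ^ (f + 1) = 10 ^ f * 10 := by ring
          omega
        omega
      rw [ih (n / 10) _ (Nat.pos_of_ne_zero hz) hdiv]
      conv_rhs => rw [divRev, dif_neg (by omega)]
      simp

lemma digitChar_val (d : Nat) (h : d < 10) :
    ((Nat.digitChar d).toNat : Int) - 48 = (d : Int) := by
  interval_cases d <;> decide

lemma toChars_vals (x : Int) (h : 10 ≤ x) (hlt : x < 10 ^ 64) :
    (PySem.Int.toChars x).map (fun c => (c.toNat : Int) - 48)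
      = (bDigitsRev 64 x).reverse := by
  rw [bDigitsRev_eq 64 x (by omega) hlt]
  rw [PySem.Int.toChars, if_neg (by omega)]
  rw [Nat.toDigits, toDigitsCore_eq (x.toNat + 1) x.toNat [] (by omega)
        (by
          have h2 : x.toNat < 2 ^ x.toNat := Nat.lt_two_pow_self
          have h3 : (2 : Nat) ^ x.toNat ≤ 10 ^ x.toNat := Nat.pow_le_pow_left (by norm_num) _
          have h4 : (10 : Nat) ^ x.toNat ≤ 10 ^ (x.toNat + 1) :=
            Nat.pow_le_pow_right (by norm_num) (Nat.le_succ _)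
          omega)]
  rw [List.append_nil]
  simp only [List.map_reverse, List.map_map]
  apply congrArg List.reverse
  apply List.map_congr_left
  intro d hd
  have hlt10 := divRev_lt x.toNat d hd
  simpa using digitChar_val d hlt10

lemma foldl_if_max (l : List Int) (a : Int) :
    l.foldl (fun m d => if d > m then d else m) a = l.foldl max a := by
  induction l generalizing a with
  | nil => rfl
  | cons d l ih =>
    simp only [List.foldl_cons, ih]
    congr 1
    rcases lt_or_ge a d with h | h
    · simp [h, max_eq_right h.le]
    · simp [not_lt.mpr h, max_eq_left h]

lemma foldl_max_reverse (l : List Int) (a : Int) :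
    l.reverse.foldl max a = l.foldl max a := by
  rw [List.foldl_reverse, List.foldl_eq_foldr]
  congr 1
  funext u v
  exact max_comm v u

lemma foldl_max_le (l : List Int) : ∀ a b : Int, (∀ d ∈ l, d ≤ b) → a ≤ b →
    l.foldl max a ≤ b := by
  induction l with
  | nil => intro a b _ ha; exact ha
  | cons d l ih =>
    intro a b hl ha
    exact ih _ _ (fun e he => hl e (List.mem_cons_of_mem _ he))
      (max_le ha (hl d (List.mem_cons_self ..)))

lemma go_eq (fuel : Nat) : ∀ x : Int, basereductGo fuel x = basereductAltGo fuel x := by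
  induction fuel with
  | zero => intro x; rfl
  | succ f ih =>
    intro x
    rw [basereductGo, basereductAltGo]
    by_cases hcap : x > 10 ^ 20
    · rw [if_pos hcap, if_neg (by omega), if_neg (by omega)]
    · rw [if_neg hcap]
      by_cases hsm : x < 10
      · rw [if_pos hsm, if_neg (by omega), if_pos (by omega)]
      · rw [if_neg hsm, if_pos (by omega)]
        have hvals := toChars_vals x (by omega)
          (by calc x ≤ 10 ^ 20 := by omega
              _ < 10 ^ 64 := by norm_num)
        simp only []
        rw [ih]
        congr 1
        -- the next values of the two loops coincide
        have hm : ((PySem.Int.toChars x).map (fun c => (c.toNat : Int) - 48)).foldl max 0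
            = (bDigitsRev 64 x).foldl (fun m d => if d > m then d else m) 0 := by
          rw [hvals, foldl_if_max, foldl_max_reverse]
        have hm9 : ((PySem.Int.toChars x).map (fun c => (c.toNat : Int) - 48)).foldl max 0 ≤ 9 := by
          apply foldl_max_le _ _ _ _ (by norm_num)
          · intro d hd
            rw [hvals] at hd
            rw [bDigitsRev_eq 64 x (by omega)
                  (by calc x ≤ 10 ^ 20 := by omega
                      _ < 10 ^ 64 := by norm_num)] at hd
            simp only [List.mem_reverse, List.mem_map] at hd
            obtain ⟨d', hd', rfl⟩ := hd
            have := divRev_lt x.toNat d' hd'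
            omega
        have ht : (if ((PySem.Int.toChars x).map (fun c => (c.toNat : Int) - 48)).foldl max 0 + 1 = 10
              then (11:Int) else ((PySem.Int.toChars x).map (fun c => (c.toNat : Int) - 48)).foldl max 0 + 1)
            = (if (bDigitsRev 64 x).foldl (fun m d => if d > m then d else m) 0 < 9
              then (bDigitsRev 64 x).foldl (fun m d => if d > m then d else m) 0 + 1 else 11) := by
          rw [← hm]
          by_cases h9 : ((PySem.Int.toChars x).map (fun c => (c.toNat : Int) - 48)).foldl max 0 = 9
          · rw [h9]; norm_num
          · rw [if_neg (by omega), if_pos (by omega)]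
        rw [← ht, ← hvals, List.foldl_map, List.foldl_map]

-- ===== VERDICT (by name: the statement is the Claim_ definition above) =====
theorem basereduct_spec : Claim_equal_basereduct := by
  intro x _
  unfold Spec_basereduct basereduct basereduct_alt
  exact go_eq 1000000 x
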